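-- pv_equiv track=rewrite | github.com/Python-Test-Engineer/earl2025 | 03.5_load_chinook_sql.py | extract_question_type
-- ===== SOURCE A (Python) =====
-- def extract_question_type(question: str) -> str:
--     """
--     Determine the type of SQL operation based on the question.
--     """
--     question = question.lower()
--
--     if any(
--         word in question
--         for word in ["average", "sum", "count", "total", "most", "least"]
--     ):
--         return "aggregation"
--     elif "join" in question or "relationship" in question or "related" in question:
--         return "join"
--     elif any(word in question for word in ["where", "find", "filter", "which"]):
--         return "filter"
--     elif "group" in question or "each" in question:
--         return "group"
--     else:
--         return "general"
-- ===== SOURCE B (Python) =====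
-- KEYWORD_CATEGORY = [
--     ("average", "aggregation"), ("sum", "aggregation"), ("count", "aggregation"),
--     ("total", "aggregation"), ("most", "aggregation"), ("least", "aggregation"),
--     ("join", "join"), ("relationship", "join"), ("related", "join"),
--     ("where", "filter"), ("find", "filter"), ("filter", "filter"), ("which", "filter"),
--     ("group", "group"), ("each", "group"),
-- ]
--
-- PRIORITY = ["aggregation", "join", "filter", "group"]
--
--
-- def extract_question_type(question: str) -> str:
--     q = question.lower()
--     matched = set()
--     for i in range(len(q)):
--         for kw, cat in KEYWORD_CATEGORY:
--             if q.startswith(kw, i):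
--                 matched.add(cat)
--     for cat in PRIORITY:
--         if cat in matched:
--             return cat
--     return "general"
-- ===== Notes on version B (the rewrite author's own statement) =====
-- stated objective: alternative
-- what changed: Instead of A's cascade of per-keyword substring searches with short-circuit returns, B makes one pass over the string positions, collects the set of all matched categories via startswith checks at each position, and afterwards selects the highest-priority matched category.
import Mathlib
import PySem

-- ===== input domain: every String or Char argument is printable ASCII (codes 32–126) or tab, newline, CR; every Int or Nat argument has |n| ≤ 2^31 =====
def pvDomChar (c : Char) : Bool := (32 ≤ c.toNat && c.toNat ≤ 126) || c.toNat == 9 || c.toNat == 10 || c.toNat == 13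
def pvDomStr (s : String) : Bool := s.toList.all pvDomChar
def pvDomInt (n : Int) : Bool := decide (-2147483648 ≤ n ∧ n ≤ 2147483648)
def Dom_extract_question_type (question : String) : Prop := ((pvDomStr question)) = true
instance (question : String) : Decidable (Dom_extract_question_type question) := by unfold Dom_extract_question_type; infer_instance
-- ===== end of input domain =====

-- B replaces A's short-circuiting cascade of substring tests by a single pass over the
-- string positions that collects the set of all matched categories, then a priority pick.

-- ===== PORT A =====
def extract_question_type (question : String) : String :=
  let question := PySem.Str.lower question
  if ["average", "sum", "count", "total", "most", "least"].any
      (fun word => PySem.Str.isIn word question) then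
    "aggregation"
  else if PySem.Str.isIn "join" question || PySem.Str.isIn "relationship" question
      || PySem.Str.isIn "related" question then
    "join"
  else if ["where", "find", "filter", "which"].any
      (fun word => PySem.Str.isIn word question) then
    "filter"
  else if PySem.Str.isIn "group" question || PySem.Str.isIn "each" question then
    "group"
  else
    "general"

-- ===== PORT B =====
def pvKeywordCategory : List (String × String) :=
  [("average", "aggregation"), ("sum", "aggregation"), ("count", "aggregation"),
   ("total", "aggregation"), ("most", "aggregation"), ("least", "aggregation"),
   ("join", "join"), ("relationship", "join"), ("related", "join"),
   ("where", "filter"), ("find", "filter"), ("filter", "filter"), ("which", "filter"),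
   ("group", "group"), ("each", "group")]

def pvPriority : List String := ["aggregation", "join", "filter", "group"]

-- one pass: for i in range(len(q)): for kw, cat in KEYWORD_CATEGORY: if q.startswith(kw, i): matched.add(cat)
def pvScan (q : List Char) : PySem.Set String :=
  (List.range q.length).foldl
    (fun acc i =>
      pvKeywordCategory.foldl
        (fun acc kv =>
          if PySem.Chars.startswith (q.drop i) kv.1.toList then PySem.Set.add acc kv.2
          else acc)
        acc)
    PySem.Set.empty

def pvPick (matched : PySem.Set String) : List String → String
  | [] => "general"
  | cat :: rest =>
      if PySem.Set.contains matched cat then cat else pvPick matched rest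

def extract_question_type_alt (question : String) : String :=
  pvPick (pvScan (PySem.Str.lower question).toList) pvPriority

-- ===== PRECONDITION & SPEC =====
def Spec_extract_question_type (question : String) (out : String) : Prop := out = extract_question_type_alt question
instance (question : String) (out : String) : Decidable (Spec_extract_question_type question out) := by unfold Spec_extract_question_type; infer_instance

-- ===== CLAIM (what is proved, stated in full; the proofs are below) =====
def Claim_equal_extract_question_type : Prop := ∀ (question : String), Dom_extract_question_type question → Spec_extract_question_type question (extract_question_type question)

-- ===== LEMMAS AND PROOFS =====

-- inner loop: membership in the fold-with-conditional-add
theorem mem_inner_fold (l : List (String × String)) (qd : List Char)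
    (acc : PySem.Set String) (y : String) :
    y ∈ l.foldl
        (fun acc kv =>
          if PySem.Chars.startswith qd kv.1.toList then PySem.Set.add acc kv.2 else acc)
        acc ↔
      y ∈ acc ∨ ∃ kv ∈ l, PySem.Chars.startswith qd kv.1.toList = true ∧ kv.2 = y := by
  induction l generalizing acc with
  | nil => simp
  | cons kv rest ih =>
      simp only [List.foldl_cons, ih, List.exists_mem_cons_iff]
      by_cases h : PySem.Chars.startswith qd kv.1.toList = true <;>
        simp only [h, if_true, if_false, Bool.false_eq_true, PySem.Set.mem_add] <;> tauto

-- outer loop over a list of indices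
theorem mem_outer_fold (q : List Char) (idxs : List Nat) (acc : PySem.Set String) (y : String) :
    y ∈ idxs.foldl
        (fun acc i =>
          pvKeywordCategory.foldl
            (fun acc kv =>
              if PySem.Chars.startswith (q.drop i) kv.1.toList then PySem.Set.add acc kv.2
              else acc)
            acc)
        acc ↔
      y ∈ acc ∨ ∃ i ∈ idxs, ∃ kv ∈ pvKeywordCategory,
        PySem.Chars.startswith (q.drop i) kv.1.toList = true ∧ kv.2 = y := by
  induction idxs generalizing acc with
  | nil => simp
  | cons i rest ih =>
      simp only [List.foldl_cons, ih, mem_inner_fold, List.exists_mem_cons_iff]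
      rw [or_assoc]

-- a nonempty pattern occurs as a prefix at some position < length iff it is a substring
theorem exists_drop_iff_isIn (q : List Char) (kw : List Char) (hkw : kw ≠ []) :
    (∃ i < q.length, kw <+: q.drop i) ↔ PySem.Chars.isIn kw q = true := by
  rw [← PySem.Chars.exists_prefix_drop_iff_isIn]
  constructor
  · rintro ⟨i, _, h⟩; exact ⟨i, h⟩
  · rintro ⟨j, h⟩
    by_cases hj : j < q.length
    · exact ⟨j, hj, h⟩
    · rw [List.drop_eq_nil_of_le (le_of_not_gt hj)] at h
      exact absurd (List.prefix_nil.mp h) hkw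

theorem pvKeywords_ne_nil : ∀ kv ∈ pvKeywordCategory, kv.1.toList ≠ [] := by decide

-- membership in the scanned set, per category, as a disjunction of substring tests
theorem mem_pvScan (q : List Char) (y : String) :
    y ∈ pvScan q ↔ ∃ kv ∈ pvKeywordCategory,
      kv.2 = y ∧ PySem.Chars.isIn kv.1.toList q = true := by
  unfold pvScan
  rw [mem_outer_fold]
  simp only [PySem.Set.empty, List.not_mem_nil, false_or, List.mem_range]
  constructor
  · rintro ⟨i, hi, kv, hkv, hp, he⟩
    refine ⟨kv, hkv, he, ?_⟩
    exact (exists_drop_iff_isIn q _ (pvKeywords_ne_nil kv hkv)).mp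
      ⟨i, hi, (PySem.Chars.startswith_iff _ _).mp hp⟩
  · rintro ⟨kv, hkv, he, hin⟩
    obtain ⟨i, hi, hp⟩ := (exists_drop_iff_isIn q _ (pvKeywords_ne_nil kv hkv)).mpr hin
    exact ⟨i, hi, kv, hkv, (PySem.Chars.startswith_iff _ _).mpr hp, he⟩

theorem contains_pvScan (q : List Char) (y : String) :
    PySem.Set.contains (pvScan q) y = true ↔ ∃ kv ∈ pvKeywordCategory,
      kv.2 = y ∧ PySem.Chars.isIn kv.1.toList q = true := by
  rw [← mem_pvScan]
  simp [PySem.Set.contains]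

theorem scan_agg (q : List Char) :
    PySem.Set.contains (pvScan q) "aggregation" =
      (PySem.Chars.isIn "average".toList q || PySem.Chars.isIn "sum".toList q ||
       PySem.Chars.isIn "count".toList q || PySem.Chars.isIn "total".toList q ||
       PySem.Chars.isIn "most".toList q || PySem.Chars.isIn "least".toList q) := by
  apply Bool.eq_iff_iff.mpr
  rw [contains_pvScan]
  simp [pvKeywordCategory, Bool.or_eq_true]
  try tauto

theorem scan_join (q : List Char) :
    PySem.Set.contains (pvScan q) "join" =
      (PySem.Chars.isIn "join".toList q || PySem.Chars.isIn "relationship".toList q ||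
       PySem.Chars.isIn "related".toList q) := by
  apply Bool.eq_iff_iff.mpr
  rw [contains_pvScan]
  simp [pvKeywordCategory, Bool.or_eq_true]
  try tauto

theorem scan_filter (q : List Char) :
    PySem.Set.contains (pvScan q) "filter" =
      (PySem.Chars.isIn "where".toList q || PySem.Chars.isIn "find".toList q ||
       PySem.Chars.isIn "filter".toList q || PySem.Chars.isIn "which".toList q) := by
  apply Bool.eq_iff_iff.mpr
  rw [contains_pvScan]
  simp [pvKeywordCategory, Bool.or_eq_true]
  try tauto

theorem scan_group (q : List Char) :
    PySem.Set.contains (pvScan q) "group" =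
      (PySem.Chars.isIn "group".toList q || PySem.Chars.isIn "each".toList q) := by
  apply Bool.eq_iff_iff.mpr
  rw [contains_pvScan]
  simp [pvKeywordCategory, Bool.or_eq_true]
  try tauto

-- ===== VERDICT (by name: the statement is the Claim_ definition above) =====
theorem extract_question_type_spec : Claim_equal_extract_question_type := by
  intro question _
  unfold Spec_extract_question_type extract_question_type extract_question_type_alt
  simp only [pvPriority, pvPick, scan_agg, scan_join, scan_filter, scan_group,
    List.any_cons, List.any_nil, Bool.or_false, PySem.Str.isIn_eq, Bool.or_assoc]
  rfl
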